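-- pv_equiv track=rewrite | github.com/mtarbit/advent-of-code | 2018/d02_1.py | check
-- ===== SOURCE A (Python) =====
-- def count(val):
--     d = {}
--
--     has_2 = 0
--     has_3 = 0
--
--     for c in val:
--         if c not in d:
--             d[c] = 0
--         d[c] += 1
--
--     for n in d.values():
--         if n == 2: has_2 += 1
--         if n == 3: has_3 += 1
--
--     return (has_2, has_3)
--
-- def check(arr):
--     has_2_count = 0
--     has_3_count = 0
--
--     for val in arr:
--         has_2, has_3 = count(val)
--         if has_2: has_2_count += 1
--         if has_3: has_3_count += 1
--
--     return has_2_count * has_3_count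
-- ===== SOURCE B (Python) =====
-- def run_lengths(val):
--     # Sort the characters so equal letters form consecutive runs, then scan
--     # the runs, collecting the set of run lengths.
--     s = sorted(val)
--     lengths = set()
--     i = 0
--     while i < len(s):
--         j = i + 1
--         while j < len(s) and s[j] == s[i]:
--             j += 1
--         lengths.add(j - i)
--         i = j
--     return lengths
--
-- def check(arr):
--     has_2_count = 0
--     has_3_count = 0
--     for val in arr:
--         lengths = run_lengths(val)
--         if 2 in lengths:
--             has_2_count += 1
--         if 3 in lengths:
--             has_3_count += 1
--     return has_2_count * has_3_count
-- ===== Notes on version B (the rewrite author's own statement) =====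
-- stated objective: alternative
-- what changed: Replaces the per-string hash-map frequency accumulation (build dict, then scan its values) with sort-then-scan: sort the characters, walk consecutive equal runs with two indices, collect the set of run lengths and test whether 2 or 3 occurs among them.
import Mathlib
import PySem

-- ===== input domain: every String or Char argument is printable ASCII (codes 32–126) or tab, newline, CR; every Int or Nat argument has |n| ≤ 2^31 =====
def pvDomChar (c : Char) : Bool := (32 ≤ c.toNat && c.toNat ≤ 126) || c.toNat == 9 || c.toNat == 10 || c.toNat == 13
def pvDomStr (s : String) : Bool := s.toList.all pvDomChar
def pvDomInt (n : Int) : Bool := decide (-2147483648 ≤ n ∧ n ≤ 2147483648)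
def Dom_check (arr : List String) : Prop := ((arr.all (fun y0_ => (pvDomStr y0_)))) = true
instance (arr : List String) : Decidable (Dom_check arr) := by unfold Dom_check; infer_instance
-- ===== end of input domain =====

-- B replaces A's per-string dict of letter frequencies by sort-then-scan over runs of equal characters (alternative decomposition, similar cost).

-- ===== PORT A =====
-- helper `count(val)`: build the frequency dict, then scan its values
def pyCount (val : String) : Int × Int :=
  let d := val.toList.foldl (fun (d : PySem.Dict Char Int) c =>
    let d := if d.contains c then d else d.insert c 0   -- if c not in d: d[c] = 0
    d.insert c (d.getD c 0 + 1)) PySem.Dict.empty       -- d[c] += 1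
  d.values.foldl (fun (p : Int × Int) n =>
    ((if n == 2 then p.1 + 1 else p.1), (if n == 3 then p.2 + 1 else p.2))) (0, 0)

def check (arr : List String) : Int :=
  let p := arr.foldl (fun (p : Int × Int) val =>
    let hs := pyCount val
    ((if hs.1 ≠ 0 then p.1 + 1 else p.1), (if hs.2 ≠ 0 then p.2 + 1 else p.2))) (0, 0)
  p.1 * p.2

-- ===== PORT B =====
-- helper `run_lengths(val)`: outer while loop = this recursion on the sorted list;
-- the inner while loop that advances j over the current run is the takeWhile/dropWhile scan
def pvRuns : List Char → PySem.Set Int → PySem.Set Int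
  | [], acc => acc
  | c :: rest, acc =>
      pvRuns (rest.dropWhile (· == c)) (acc.add (((rest.takeWhile (· == c)).length : Int) + 1))
termination_by s _ => s.length
decreasing_by
  simp only [List.length_cons]
  exact Nat.lt_succ_of_le (List.length_dropWhile_le _ _)

def pyRunLengths (val : String) : PySem.Set Int :=
  pvRuns (PySem.List.sorted val.toList (fun c => c) false) PySem.Set.empty

def check_alt (arr : List String) : Int :=
  let p := arr.foldl (fun (p : Int × Int) val =>
    let lengths := pyRunLengths val
    ((if (2 : Int) ∈ lengths then p.1 + 1 else p.1),
     (if (3 : Int) ∈ lengths then p.2 + 1 else p.2))) (0, 0)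
  p.1 * p.2

-- ===== PRECONDITION & SPEC =====
def Spec_check (arr : List String) (out : Int) : Prop := out = check_alt arr
instance (arr : List String) (out : Int) : Decidable (Spec_check arr out) := by unfold Spec_check; infer_instance

-- ===== CLAIM (what is proved, stated in full; the proofs are below) =====
def Claim_equal_check : Prop := ∀ (arr : List String), Dom_check arr → Spec_check arr (check arr)

-- ===== LEMMAS AND PROOFS =====

-- A's dict-building loop is Counter(val)
lemma dictfold_eq_counter (xs : List Char) :
    xs.foldl (fun (d : PySem.Dict Char Int) c =>
      let d := if d.contains c then d else d.insert c 0
      d.insert c (d.getD c 0 + 1)) PySem.Dict.empty = PySem.Dict.counter xs := by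
  rw [← PySem.Dict.foldl_insert_getD_add_one_eq_counter]
  congr 1
  funext d c
  by_cases h : d.contains c
  · simp [h]
  · simp only [h, if_false, Bool.false_eq_true]
    rw [PySem.Dict.getD_insert_self, PySem.Dict.insert_insert_self]
    congr 1
    have : d.getD c 0 = 0 := by
      simp [PySem.Dict.getD, (PySem.Dict.get?_eq_none_iff_contains d c).2 (by simpa using h)]
    rw [this]

-- A's values loop counts the 2s and the 3s
lemma valuesfold_count (l : List Int) (p : Int × Int) :
    l.foldl (fun (p : Int × Int) n =>
      ((if n == 2 then p.1 + 1 else p.1), (if n == 3 then p.2 + 1 else p.2))) p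
      = (p.1 + (l.count 2 : Int), p.2 + (l.count 3 : Int)) := by
  induction l generalizing p with
  | nil => simp
  | cons x t ih =>
    simp only [List.foldl_cons, ih, List.count_cons]
    refine Prod.ext ?_ ?_ <;> simp only [] <;>
      by_cases h : x = 2 <;> by_cases h3 : x = 3 <;> simp_all <;> ring

-- every element of dropWhile (== c) of a pairwise-≤ list bounded below by c differs from c
lemma ne_of_mem_dropWhile (c : Char) (rest : List Char)
    (hp : rest.Pairwise (· ≤ ·)) (hle : ∀ y ∈ rest, c ≤ y)
    (x : Char) (hx : x ∈ rest.dropWhile (· == c)) : x ≠ c := by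
  have hsub := List.dropWhile_sublist (l := rest) (· == c)
  have hp' := hp.sublist hsub
  have hh := List.head?_dropWhile_not (· == c) rest
  cases hd : rest.dropWhile (· == c) with
  | nil => simp [hd] at hx
  | cons d t =>
    rw [hd] at hh hx hp'
    simp only [List.head?_cons] at hh
    have hdc : d ≠ c := by simpa using hh
    have hcd : c < d := lt_of_le_of_ne (hle d (hsub.mem (by simp [hd]))) (Ne.symm hdc)
    rcases List.mem_cons.1 hx with rfl | hxt
    · exact hdc
    · have : d ≤ x := (List.pairwise_cons.1 hp').1 x hxt
      exact fun h => absurd (h ▸ this) (not_le.2 hcd)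

-- membership in B's run-length set, for a sorted (pairwise ≤) list
lemma mem_pvRuns (l : List Char) (acc : PySem.Set Int) (hl : l.Pairwise (· ≤ ·)) (n : Int) :
    n ∈ pvRuns l acc ↔ n ∈ acc ∨ ∃ c ∈ l, (l.count c : Int) = n := by
  induction l, acc using pvRuns.induct with
  | case1 acc => simp [pvRuns]
  | case2 c rest acc ih =>
    obtain ⟨hc, hrest⟩ := List.pairwise_cons.1 hl
    set run := rest.takeWhile (· == c) with hrun
    set rest' := rest.dropWhile (· == c) with hrest'
    have hsplit : rest = run ++ rest' := (List.takeWhile_append_dropWhile).symm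
    have hrunc : ∀ x ∈ run, x = c := fun x hx => by simpa using List.mem_takeWhile_imp hx
    have hne : ∀ x ∈ rest', x ≠ c := ne_of_mem_dropWhile c rest hrest hc
    have hp' : rest'.Pairwise (· ≤ ·) := hrest.sublist (List.dropWhile_sublist _)
    have hcount_c : (c :: rest).count c = run.length + 1 := by
      rw [hsplit, List.count_cons_self, List.count_append]
      have h1 : run.count c = run.length := List.count_eq_length.2 (fun b hb => (hrunc b hb).symm)
      have h2 : rest'.count c = 0 := List.count_eq_zero.2 (fun h => (hne c h) rfl)
      omega
    have hcount_other : ∀ x ∈ rest', (c :: rest).count x = rest'.count x := by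
      intro x hx
      rw [hsplit, List.count_cons_of_ne (fun h => hne x hx h.symm), List.count_append]
      have : run.count x = 0 := List.count_eq_zero.2 (fun h => hne x hx (hrunc x h))
      omega
    rw [pvRuns, ih hp', PySem.Set.mem_add]
    constructor
    · rintro (⟨h | h⟩ | ⟨x, hx, hcx⟩)
      · exact Or.inl h
      · exact Or.inr ⟨c, by simp, by rw [hcount_c]; push_cast; omega⟩
      · refine Or.inr ⟨x, by simp [hsplit, hx], ?_⟩
        rw [hcount_other x hx]; exact hcx
    · rintro (h | ⟨x, hx, hcx⟩)
      · exact Or.inl (Or.inl h)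
      · rcases List.mem_cons.1 hx with rfl | hx
        · exact Or.inl (Or.inr (by rw [hcount_c] at hcx; push_cast at hcx ⊢; omega))
        · rw [hsplit, List.mem_append] at hx
          rcases hx with hx | hx
          · have := hrunc x hx; subst this
            exact Or.inl (Or.inr (by rw [hcount_c] at hcx; push_cast at hcx ⊢; omega))
          · exact Or.inr ⟨x, hx, by rw [← hcount_other x hx]; exact hcx⟩

-- per-string bridge: A's counter of value n is nonzero iff n is a run length of the sorted string
lemma count_ne_zero_iff_runlength (val : String) (n : Int) :
    ((((PySem.Dict.counter val.toList).values).count n : Int) ≠ 0) ↔ n ∈ pyRunLengths val := by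
  have hvals : (PySem.Dict.counter val.toList).values
      = (PySem.Set.ofList val.toList).map (fun k => (val.toList.count k : Int)) := by
    simp only [PySem.Dict.values, PySem.Dict.items_counter, List.map_map]
    rfl
  have hs := PySem.List.sorted_perm val.toList (fun c => c) false
  have hmem : ∀ x, x ∈ PySem.List.sorted val.toList (fun c => c) false ↔ x ∈ val.toList :=
    fun x => hs.mem_iff
  have hcnt : ∀ x, (PySem.List.sorted val.toList (fun c => c) false).count x = val.toList.count x :=
    fun x => hs.count_eq x
  rw [pyRunLengths, mem_pvRuns _ _ (PySem.List.sorted_pairwise val.toList (fun c => c)) n]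
  constructor
  · intro h
    have : n ∈ (PySem.Dict.counter val.toList).values := by
      rcases Nat.eq_zero_or_pos (((PySem.Dict.counter val.toList).values).count n) with h0 | hpos
      · simp [h0] at h
      · exact List.count_pos_iff.1 hpos
    rw [hvals, List.mem_map] at this
    obtain ⟨k, hk, hkn⟩ := this
    exact Or.inr ⟨k, (hmem k).2 ((PySem.Set.mem_ofList _ _).1 hk), by rw [hcnt]; exact hkn⟩
  · rintro (h | ⟨c, hc, hcn⟩)
    · simp [PySem.Set.empty] at h
    · have : n ∈ (PySem.Dict.counter val.toList).values := by
        rw [hvals, List.mem_map]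
        exact ⟨c, (PySem.Set.mem_ofList _ _).2 ((hmem c).1 hc), by rw [← hcnt]; exact hcn⟩
      have := List.count_pos_iff.2 this
      omega

-- A's per-string result, characterised
lemma pyCount_eq (val : String) :
    pyCount val = ((((PySem.Dict.counter val.toList).values).count 2 : Int),
                   (((PySem.Dict.counter val.toList).values).count 3 : Int)) := by
  rw [pyCount]
  simp only [dictfold_eq_counter, valuesfold_count]
  simp

-- ===== VERDICT (by name: the statement is the Claim_ definition above) =====
theorem check_spec : Claim_equal_check := by
  intro arr _
  unfold Spec_check check check_alt
  have hfun : (fun (p : Int × Int) val =>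
      let hs := pyCount val
      ((if hs.1 ≠ 0 then p.1 + 1 else p.1), (if hs.2 ≠ 0 then p.2 + 1 else p.2)))
      = (fun (p : Int × Int) val =>
      let lengths := pyRunLengths val
      ((if (2 : Int) ∈ lengths then p.1 + 1 else p.1),
       (if (3 : Int) ∈ lengths then p.2 + 1 else p.2))) := by
    funext p val
    have h2 : ((pyCount val).1 ≠ 0) = ((2 : Int) ∈ pyRunLengths val) := by
      rw [pyCount_eq]; exact propext (count_ne_zero_iff_runlength val 2)
    have h3 : ((pyCount val).2 ≠ 0) = ((3 : Int) ∈ pyRunLengths val) := by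
      rw [pyCount_eq]; exact propext (count_ne_zero_iff_runlength val 3)
    simp only [h2, h3]
  rw [hfun]
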